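-- pv_equiv track=rewrite | github.com/beshirr/LZ77 | LZ77.py | SearchForSequence
-- ===== SOURCE A (Python) =====
-- def SearchForSequence(searchWindow: str, subString: str) -> int:
--     swSize = len(searchWindow)
--     subLen = len(subString)
--
--     for i in range(swSize - 1, -1, -1):
--         j = 0
--         while j + i < swSize and j < subLen and searchWindow[i + j] == subString[j]:
--             j += 1
--             if j == subLen:
--                 return i
--     return -1
-- ===== SOURCE B (Python) =====
-- def SearchForSequence(searchWindow: str, subString: str) -> int:
--     if not subString:
--         return -1
--     m = len(subString)
--     last = -1
--     for i in range(len(searchWindow) - m + 1):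
--         if searchWindow[i:i + m] == subString:
--             last = i
--     return last
-- ===== Notes on version B (the rewrite author's own statement) =====
-- stated objective: faster
-- what changed: Replaces A's backward scan with a hand-written per-character inner while-loop by a single forward pass that compares a slice at each position and keeps the last matching index (empty pattern still yields -1).
import Mathlib
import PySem

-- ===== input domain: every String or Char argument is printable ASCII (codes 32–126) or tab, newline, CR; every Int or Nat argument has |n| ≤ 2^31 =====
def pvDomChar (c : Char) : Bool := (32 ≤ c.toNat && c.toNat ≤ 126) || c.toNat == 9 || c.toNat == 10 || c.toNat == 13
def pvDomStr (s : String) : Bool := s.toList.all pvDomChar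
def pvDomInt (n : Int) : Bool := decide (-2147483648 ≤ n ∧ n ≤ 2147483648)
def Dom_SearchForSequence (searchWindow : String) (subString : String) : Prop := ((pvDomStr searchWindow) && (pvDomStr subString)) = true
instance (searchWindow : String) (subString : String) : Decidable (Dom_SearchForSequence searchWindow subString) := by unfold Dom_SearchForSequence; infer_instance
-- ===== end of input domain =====

-- B replaces A's backward scan with hand-written inner while-loop by a single forward
-- pass comparing a slice at each position and keeping the last matching index.

-- ===== PORT A =====
-- inner 'while' loop of A: j counts matched characters; returns true iff j reaches subLen
-- (indices i+j, j are in range whenever the guard holds, so getD is exact Python indexing)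
def pvALoop (sw sub : List Char) (i j : Nat) : Bool :=
  if j + i < sw.length ∧ j < sub.length ∧ sw.getD (i + j) ' ' = sub.getD j ' ' then
    if j + 1 = sub.length then true
    else pvALoop sw sub i (j + 1)
  else false
termination_by sub.length - j
decreasing_by omega

-- the 'for i in range(swSize-1, -1, -1)' loop with its early 'return i'
-- (every i produced by that range is ≥ 0, so i.toNat is exact)
def pvAOuter (sw sub : List Char) : List Int → Int
  | [] => -1
  | i :: rest => if pvALoop sw sub i.toNat 0 then i else pvAOuter sw sub rest

def SearchForSequence (searchWindow : String) (subString : String) : Int :=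
  let sw := searchWindow.toList
  let sub := subString.toList
  pvAOuter sw sub (PySem.List.pyRange ((sw.length : Int) - 1) (-1) (-1))

-- ===== PORT B =====
def SearchForSequence_alt (searchWindow : String) (subString : String) : Int :=
  let p := subString.toList
  if p = [] then -1
  else
    let s := searchWindow.toList
    let m : Int := p.length
    (PySem.List.pyRange 0 ((s.length : Int) - m + 1) 1).foldl
      (fun last i => if PySem.List.slice s (some i) (some (i + m)) = p then i else last) (-1)

-- ===== PRECONDITION & SPEC =====
def Spec_SearchForSequence (searchWindow : String) (subString : String) (out : Int) : Prop := out = SearchForSequence_alt searchWindow subString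
instance (searchWindow : String) (subString : String) (out : Int) : Decidable (Spec_SearchForSequence searchWindow subString out) := by unfold Spec_SearchForSequence; infer_instance

-- ===== CLAIM (what is proved, stated in full; the proofs are below) =====
def Claim_equal_SearchForSequence : Prop := ∀ (searchWindow : String) (subString : String), Dom_SearchForSequence searchWindow subString → Spec_SearchForSequence searchWindow subString (SearchForSequence searchWindow subString)

-- ===== LEMMAS AND PROOFS =====

-- A's inner loop succeeds exactly when the rest of the pattern occurs at position i+j
lemma pvALoop_iff (sw sub : List Char) (i : Nat) :
    ∀ d j, sub.length - j = d → j < sub.length →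
      (pvALoop sw sub i j = true ↔ sub.drop j <+: sw.drop (i + j)) := by
  intro d
  induction d with
  | zero => intro j hd hj; omega
  | succ d ih =>
    intro j hd hj
    rw [pvALoop]
    have hdropsub : sub.drop j = sub[j] :: sub.drop (j + 1) := (List.getElem_cons_drop hj).symm
    by_cases hin : j + i < sw.length
    · have hiw : i + j < sw.length := by omega
      have hdropsw : sw.drop (i + j) = sw[i + j] :: sw.drop (i + j + 1) :=
        (List.getElem_cons_drop hiw).symm
      have hgd : sw.getD (i + j) ' ' = sw[i + j] := List.getD_eq_getElem sw ' ' hiw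
      have hgd2 : sub.getD j ' ' = sub[j] := List.getD_eq_getElem sub ' ' hj
      by_cases hc : sw[i + j] = sub[j]
      · rw [if_pos ⟨hin, hj, by rw [hgd, hgd2, hc]⟩]
        rw [hdropsub, hdropsw]
        by_cases hlast : j + 1 = sub.length
        · rw [if_pos hlast]
          have : sub.drop (j + 1) = [] := by rw [List.drop_eq_nil_iff]; omega
          simp [this, List.cons_prefix_cons, hc]
        · rw [if_neg hlast]
          have := ih (j + 1) (by omega) (by omega)
          rw [this]
          have : i + (j + 1) = i + j + 1 := by omega
          rw [this, List.cons_prefix_cons]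
          simp [hc]
      · rw [if_neg (by rw [hgd, hgd2]; tauto)]
        rw [hdropsub, hdropsw, List.cons_prefix_cons]
        simp only [Bool.false_eq_true, false_iff]
        intro hcontra
        exact hc hcontra.1.symm
    · rw [if_neg (fun hC => hin hC.1)]
      have hnil : sw.drop (i + j) = [] := by rw [List.drop_eq_nil_iff]; omega
      rw [hnil, hdropsub]
      simp only [Bool.false_eq_true, false_iff]
      intro hc
      have hlen := hc.length_le
      simp only [List.length_cons, List.length_drop, List.length_nil] at hlen
      omega
lemma pvALoop_zero (sw sub : List Char) (k : Nat) (hne : sub ≠ []) :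
    pvALoop sw sub k 0 = sub.isPrefixOf (sw.drop k) := by
  have h0 : 0 < sub.length := List.length_pos_iff.mpr hne
  have := pvALoop_iff sw sub k sub.length 0 (by omega) h0
  simp only [List.drop_zero, Nat.add_zero] at this
  rw [Bool.eq_iff_iff, this, List.isPrefixOf_iff_prefix]

lemma pvALoop_nil (sw : List Char) (i j : Nat) : pvALoop sw [] i j = false := by
  rw [pvALoop]; simp

-- A's early-return loop is a find? over the index list
lemma pvAOuter_eq (sw sub : List Char) :
    ∀ is : List Int, pvAOuter sw sub is = (is.find? (fun i => pvALoop sw sub i.toNat 0)).getD (-1) := by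
  intro is
  induction is with
  | nil => simp [pvAOuter]
  | cons x t ih =>
    rw [pvAOuter, List.find?_cons]
    by_cases h : pvALoop sw sub x.toNat 0 = true
    · simp [h]
    · simp only [Bool.not_eq_true] at h
      simp [h, ih]

-- B's 'keep the last match' fold is a find? over the reversed index list
lemma foldl_last (q : Int → Prop) [DecidablePred q] :
    ∀ (l : List Int) (acc : Int),
      l.foldl (fun last i => if q i then i else last) acc
        = (l.reverse.find? (fun i => decide (q i))).getD acc := by
  intro l
  induction l with
  | nil => intro acc; simp
  | cons x t ih =>
    intro acc
    rw [List.foldl_cons, ih, List.reverse_cons, List.find?_append]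
    cases h : t.reverse.find? (fun i => decide (q i)) with
    | some y => simp
    | none =>
      simp only [Option.none_or]
      by_cases hq : q x <;> simp [List.find?, hq]

-- a predicate false from position a onward can be searched in the shorter range
lemma find?_reverse_range_restrict (p : Nat → Bool) (a n : Nat) (ha : a ≤ n)
    (h : ∀ i, a ≤ i → p i = false) :
    (List.range n).reverse.find? p = (List.range a).reverse.find? p := by
  obtain ⟨b, rfl⟩ : ∃ b, n = a + b := ⟨n - a, by omega⟩
  rw [List.range_add, List.reverse_append, List.find?_append]
  have hnone : ((List.range b).map (a + ·)).reverse.find? p = none := by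
    rw [List.find?_eq_none]
    intro x hx
    simp only [List.mem_reverse, List.mem_map, List.mem_range] at hx
    obtain ⟨k, _, rfl⟩ := hx
    simp [h (a + k) (by omega)]
  rw [hnone, Option.none_or]

-- prefix at k ↔ the length-m slice at k equals the pattern
lemma take_eq_iff_prefix (s p : List Char) (k : Nat) :
    ((s.drop k).take p.length = p) ↔ p <+: s.drop k := by
  rw [List.prefix_iff_eq_take, eq_comm]

-- ===== VERDICT (by name: the statement is the Claim_ definition above) =====
theorem SearchForSequence_spec : Claim_equal_SearchForSequence := by
  intro searchWindow subString _
  unfold Spec_SearchForSequence SearchForSequence SearchForSequence_alt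
  set s := searchWindow.toList with hs
  set p := subString.toList with hp
  simp only []
  by_cases hpe : p = []
  · rw [if_pos hpe, pvAOuter_eq, hpe]
    have hfalse : (fun i : Int => pvALoop s [] i.toNat 0) = fun _ => false := by
      funext i; exact pvALoop_nil s i.toNat 0
    rw [hfalse, List.find?_eq_none.mpr (fun _ _ => by simp)]
    rfl
  · rw [if_neg hpe]
    set n := s.length with hn
    set m := p.length with hm
    have hm1 : 1 ≤ m := List.length_pos_iff.mpr hpe
    -- A side
    rw [pvAOuter_eq]
    rw [PySem.List.pyRange_neg_one_eq_reverse]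
    have h01 : ((-1 : Int) + 1) = 0 := by ring
    have hn1 : ((n : Int) - 1 + 1) = (n : Int) := by ring
    rw [h01, hn1, PySem.List.pyRange_one]
    simp only [Int.sub_zero, Int.toNat_natCast, Int.zero_add]
    rw [← List.map_reverse, List.find?_map]
    have hApred : ((fun i : Int => pvALoop s p i.toNat 0) ∘ (fun k : Nat => (k : Int)))
        = fun k : Nat => p.isPrefixOf (s.drop k) := by
      funext k
      simp only [Function.comp, Int.toNat_natCast]
      exact pvALoop_zero s p k hpe
    rw [hApred]
    -- B side
    rw [foldl_last (fun i => PySem.List.slice s (some i) (some (i + (m : Int))) = p)]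
    by_cases hmn : m ≤ n
    · have hK : ((n : Int) - (m : Int) + 1) = ((n - m + 1 : Nat) : Int) := by push_cast; omega
      rw [hK, PySem.List.pyRange_one]
      simp only [Int.sub_zero, Int.toNat_natCast, Int.zero_add]
      rw [← List.map_reverse, List.find?_map]
      have hBpred : ((fun i : Int => decide (PySem.List.slice s (some i) (some (i + (m : Int))) = p))
          ∘ (fun k : Nat => (k : Int))) = fun k : Nat => p.isPrefixOf (s.drop k) := by
        funext k
        simp only [Function.comp, PySem.List.slice_natCast_add]
        rw [Bool.eq_iff_iff]
        simp only [decide_eq_true_eq, List.isPrefixOf_iff_prefix]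
        exact take_eq_iff_prefix s p k
      rw [hBpred]
      rw [find?_reverse_range_restrict (fun k => p.isPrefixOf (s.drop k)) (n - m + 1) n (by omega)
        (by
          intro i hi
          rw [Bool.eq_false_iff]
          intro hc
          have hpre := List.isPrefixOf_iff_prefix.mp hc
          have := hpre.length_le
          simp only [List.length_drop] at this
          omega)]
    · have hK : ((n : Int) - (m : Int) + 1) ≤ 0 := by omega
      rw [PySem.List.pyRange_one_eq_nil (by omega)]
      simp only [List.reverse_nil, List.find?_nil]
      have hnone : (List.range n).reverse.find? (fun k => p.isPrefixOf (s.drop k)) = none := by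
        rw [List.find?_eq_none]
        intro x hx hc
        have hpre := List.isPrefixOf_iff_prefix.mp hc
        have := hpre.length_le
        simp only [List.length_drop] at this
        omega
      rw [hnone]
      rfl
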